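-- pv_equiv track=rewrite | github.com/marczakdaniel/Artificial-Intelligence-University | pracownia2/z1-3.py | zly_wiersz
-- ===== SOURCE A (Python) =====
-- def zly_wiersz(wiersz, D):
--     i = 0
--     O = []
--     while i < len(wiersz):
--         if (wiersz[i] == 1):
--             dod = 1
--             i += 1
--             while (i < len(wiersz) and wiersz[i] == 1):
--                 dod += 1
--                 i += 1
--             O.append(dod)
--         i += 1
--     if (O == D):
--         return False
--     #if (opt_dist(wiersz, D) != 0):
--     #    return True
--     return True
-- ===== SOURCE B (Python) =====
-- def zly_wiersz(wiersz, D):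
--     # Match the row against D directly: each d in D must correspond to the next
--     # maximal block of 1s; never builds the run-length list, exits early on mismatch.
--     n = len(wiersz)
--     pos = 0
--     for d in D:
--         while pos < n and wiersz[pos] != 1:
--             pos += 1
--         if d < 1 or n - pos < d:
--             return True
--         if any(wiersz[pos + j] != 1 for j in range(d)):
--             return True
--         if pos + d < n and wiersz[pos + d] == 1:
--             return True
--         pos += d
--     return any(wiersz[j] == 1 for j in range(pos, n))
-- ===== Notes on version B (the rewrite author's own statement) =====
-- stated objective: alternative
-- what changed: Instead of building the run-length list O and comparing it to D, B consumes D entry by entry and matches each d against the next maximal block of 1s in the row in place (early exit on the first mismatch, a final scan for leftover 1s), never constructing O.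
import Mathlib
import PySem

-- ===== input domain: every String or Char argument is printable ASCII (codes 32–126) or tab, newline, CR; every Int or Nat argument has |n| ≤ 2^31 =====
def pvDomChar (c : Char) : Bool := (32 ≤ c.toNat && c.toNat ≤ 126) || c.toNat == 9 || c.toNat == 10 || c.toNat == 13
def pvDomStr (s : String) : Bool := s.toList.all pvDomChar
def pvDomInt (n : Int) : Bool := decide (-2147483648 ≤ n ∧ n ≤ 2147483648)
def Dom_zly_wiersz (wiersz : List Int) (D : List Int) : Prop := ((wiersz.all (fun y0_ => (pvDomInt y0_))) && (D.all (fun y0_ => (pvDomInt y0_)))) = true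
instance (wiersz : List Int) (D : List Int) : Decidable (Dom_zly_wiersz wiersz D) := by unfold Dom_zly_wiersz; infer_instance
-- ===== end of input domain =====

set_option maxRecDepth 4000


-- B matches the row against D directly (consuming D entry by entry, early exit) instead of
-- building the run-length list and comparing it to D (alternative; same return value).

-- ===== PORT A =====
-- inner `while i < len(wiersz) and wiersz[i] == 1: dod += 1; i += 1`; returns final (i, dod)
def zlyInner (wiersz : List Int) (i : Nat) (dod : Int) : Nat × Int :=
  if h : i < wiersz.length then
    if wiersz[i] = 1 then zlyInner wiersz (i + 1) (dod + 1) else (i, dod)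
  else (i, dod)
termination_by wiersz.length - i
decreasing_by exact Nat.sub_succ_lt_self _ _ h

theorem zlyInner_fst_ge (wiersz : List Int) (i : Nat) (dod : Int) :
    i ≤ (zlyInner wiersz i dod).1 := by
  fun_induction zlyInner with
  | case1 i dod h hv ih => omega
  | case2 => simp
  | case3 => simp

-- outer `while i < len(wiersz): …` accumulating O
def zlyOuter (wiersz : List Int) (i : Nat) (O : List Int) : List Int :=
  if h : i < wiersz.length then
    if wiersz[i] = 1 then
      zlyOuter wiersz ((zlyInner wiersz (i + 1) 1).1 + 1) (O ++ [(zlyInner wiersz (i + 1) 1).2])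
    else zlyOuter wiersz (i + 1) O
  else O
termination_by wiersz.length - i
decreasing_by
  · exact Nat.sub_lt_sub_left h
      (Nat.lt_succ_of_le (Nat.le_trans (Nat.le_succ i) (zlyInner_fst_ge wiersz (i + 1) 1)))
  · exact Nat.sub_succ_lt_self _ _ h

def zly_wiersz (wiersz : List Int) (D : List Int) : Bool :=
  if zlyOuter wiersz 0 [] = D then false else true

-- ===== PORT B =====
-- `while pos < n and wiersz[pos] != 1: pos += 1`
def skipIdx (w : List Int) (pos : Nat) : Nat :=
  if h : pos < w.length then
    if w[pos] ≠ 1 then skipIdx w (pos + 1) else pos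
  else pos
termination_by w.length - pos
decreasing_by exact Nat.sub_succ_lt_self _ _ h

-- `any(wiersz[j] == 1 for j in range(pos, n))`
def anyOnesFrom (w : List Int) (pos : Nat) : Bool :=
  if h : pos < w.length then
    if w[pos] = 1 then true else anyOnesFrom w (pos + 1)
  else false
termination_by w.length - pos
decreasing_by exact Nat.sub_succ_lt_self _ _ h

-- `any(wiersz[pos + j] != 1 for j in range(d))` (d successive reads from index pos on)
def anyNonOne (w : List Int) (pos : Nat) (d : Nat) : Bool :=
  match d with
  | 0 => false
  | d' + 1 => if w.getD pos 0 ≠ 1 then true else anyNonOne w (pos + 1) d'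

-- the `for d in D:` loop of Source B, carrying the scan position `pos`
def posMatch (w : List Int) (pos : Nat) (D : List Int) : Bool :=
  match D with
  | [] => anyOnesFrom w pos
  | d :: ds =>
    let p := skipIdx w pos
    if d < 1 || ((w.length : Int) - (p : Int)) < d then true
    else if anyNonOne w p d.toNat then true
    else if (decide (p + d.toNat < w.length)) && (w.getD (p + d.toNat) 0 == 1) then true
    else posMatch w (p + d.toNat) ds

def zly_wiersz_alt (wiersz : List Int) (D : List Int) : Bool :=
  posMatch wiersz 0 D

-- ===== PRECONDITION & SPEC =====
def Spec_zly_wiersz (wiersz : List Int) (D : List Int) (out : Bool) : Prop := out = zly_wiersz_alt wiersz D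
instance (wiersz : List Int) (D : List Int) (out : Bool) : Decidable (Spec_zly_wiersz wiersz D out) := by unfold Spec_zly_wiersz; infer_instance

-- ===== CLAIM (what is proved, stated in full; the proofs are below) =====
def Claim_equal_zly_wiersz : Prop := ∀ (wiersz : List Int) (D : List Int), Dom_zly_wiersz wiersz D → Spec_zly_wiersz wiersz D (zly_wiersz wiersz D)

-- ===== LEMMAS AND PROOFS =====

-- common reference: the run lengths of 1s
def runsRef (l : List Int) : List Int :=
  match l with
  | [] => []
  | x :: xs =>
    if x = 1 then ((xs.takeWhile (· == 1)).length + 1 : Int) :: runsRef (xs.dropWhile (· == 1))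
    else runsRef xs
termination_by l.length
decreasing_by
  · exact Nat.lt_succ_of_le (List.length_dropWhile_le _ _)
  · exact Nat.lt_succ_self _

theorem zlyInner_eq (wiersz : List Int) (i : Nat) (dod : Int) :
    zlyInner wiersz i dod =
      (i + ((wiersz.drop i).takeWhile (· == 1)).length,
       dod + ((wiersz.drop i).takeWhile (· == 1)).length) := by
  fun_induction zlyInner with
  | case1 i dod hi hv ih =>
    have hd : wiersz.drop i = wiersz[i] :: wiersz.drop (i + 1) :=
      List.drop_eq_getElem_cons hi
    rw [ih, hd, List.takeWhile_cons]
    simp only [hv, beq_self_eq_true, if_true, List.length_cons, Prod.mk.injEq]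
    refine ⟨by omega, by push_cast; ring⟩
  | case2 i dod hi hv =>
    have hd : wiersz.drop i = wiersz[i] :: wiersz.drop (i + 1) :=
      List.drop_eq_getElem_cons hi
    rw [hd, List.takeWhile_cons]
    simp [hv]
  | case3 i dod hi =>
    have : wiersz.drop i = [] := List.drop_eq_nil_of_le (by omega)
    simp [this]

-- the head of `dropWhile p l` (if any) fails p
theorem head?_dropWhile_false {α : Type} (p : α → Bool) (l : List α) :
    ∀ y ∈ (l.dropWhile p).head?, p y = false := by
  induction l with
  | nil => simp
  | cons x xs ih =>
    rw [List.dropWhile_cons]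
    by_cases h : p x = true
    · simpa [h] using ih
    · simp_all

-- runsRef ignores a leading non-1 element
theorem runsRef_tail (l : List Int) (h : ∀ y ∈ l.head?, (y == 1) = false) :
    runsRef l = runsRef l.tail := by
  cases l with
  | nil => simp
  | cons x xs =>
    have hx : ¬ x = 1 := by simpa using h x rfl
    rw [runsRef]
    simp [hx]

-- dropWhile p = drop (length of takeWhile p)
theorem dropWhile_eq_drop {α : Type} (p : α → Bool) (L : List α) :
    L.dropWhile p = L.drop ((L.takeWhile p).length) := by
  induction L with
  | nil => simp
  | cons x xs ih =>
    by_cases hx : p x = true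
    · simp [hx, ih]
    · simp [hx]

theorem zlyOuter_eq (wiersz : List Int) (i : Nat) (O : List Int) :
    zlyOuter wiersz i O = O ++ runsRef (wiersz.drop i) := by
  fun_induction zlyOuter with
  | case1 i O h hv ih =>
    rw [ih, zlyInner_eq]
    have hdw : (wiersz.drop (i + 1)).dropWhile (· == 1) =
        wiersz.drop (i + 1 + ((wiersz.drop (i + 1)).takeWhile (· == 1)).length) := by
      rw [dropWhile_eq_drop, List.drop_drop]
    have hne : ∀ y ∈ (wiersz.drop
        (i + 1 + ((wiersz.drop (i + 1)).takeWhile (· == 1)).length)).head?, (y == 1) = false := by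
      rw [← hdw]; exact head?_dropWhile_false _ _
    have hskip : runsRef (wiersz.drop (i + 1 + ((wiersz.drop (i + 1)).takeWhile (· == 1)).length))
        = runsRef (wiersz.drop (i + 1 + ((wiersz.drop (i + 1)).takeWhile (· == 1)).length + 1)) := by
      rw [runsRef_tail _ hne, List.tail_drop]
    have hd : wiersz.drop i = wiersz[i] :: wiersz.drop (i + 1) :=
      List.drop_eq_getElem_cons h
    rw [hd, runsRef]
    simp only [hv, if_true]
    rw [hdw, hskip, List.append_assoc]
    congr 1
    simp only [List.singleton_append]
    congr 1
    omega
  | case2 i O h hv ih =>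
    rw [ih]
    have hd : wiersz.drop i = wiersz[i] :: wiersz.drop (i + 1) :=
      List.drop_eq_getElem_cons h
    rw [hd, runsRef]
    simp [hv]
  | case3 i O h =>
    have : wiersz.drop i = [] := List.drop_eq_nil_of_le (by omega)
    simp [this, runsRef]

-- B-side lemmas

-- proof-side reference: the suffix-list form of B's matcher
def matchRuns (xs : List Int) (D : List Int) : Bool :=
  match D with
  | [] => xs.any (fun x => x == 1)
  | d :: ds =>
    let ys := xs.dropWhile (fun x => x != 1)
    if d < 1 || (ys.length : Int) < d then true
    else if (ys.take d.toNat).any (fun x => x != 1) then true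
    else if d < (ys.length : Int) && (ys[d.toNat]?.getD 0 == 1) then true
    else matchRuns (ys.drop d.toNat) ds

-- runsRef is empty iff the list has no 1
theorem runsRef_eq_nil (l : List Int) : (runsRef l = []) ↔ (l.any (fun x => x == 1)) = false := by
  fun_induction runsRef with
  | case1 => simp
  | case2 xs ih => simp
  | case3 x xs hx ih => simpa [hx] using ih

-- runsRef ignores a leading stretch of non-1 elements
theorem runsRef_dropWhile_ne (xs : List Int) :
    runsRef (xs.dropWhile (fun x => x != 1)) = runsRef xs := by
  induction xs with
  | nil => simp
  | cons x l ih =>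
    by_cases hx : x = 1
    · simp [hx]
    · rw [List.dropWhile_cons]
      have hb : (x != 1) = true := by simp [hx]
      rw [hb, if_pos rfl, ih, runsRef, if_neg hx]

-- decompose a row starting with 1 into its leading block of 1s and the rest
theorem block_decomp (ys' : List Int) : ∃ (ones rest : List Int),
    ones ++ rest = 1 :: ys' ∧ (∀ x ∈ ones, x = 1) ∧
    (∀ b ∈ rest.head?, (b == 1) = false) ∧ 0 < ones.length ∧
    runsRef (1 :: ys') = (ones.length : Int) :: runsRef rest := by
  refine ⟨1 :: ys'.takeWhile (· == 1), ys'.dropWhile (· == 1), by simp, ?_, ?_, by simp, ?_⟩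
  · intro x hx
    rcases List.mem_cons.mp hx with h | h
    · exact h
    · simpa using List.mem_takeWhile_imp h
  · exact head?_dropWhile_false _ _
  · rw [runsRef, if_pos rfl, List.length_cons]
    push_cast
    ring_nf

theorem matchRuns_eq (D : List Int) (xs : List Int) :
    matchRuns xs D = decide (runsRef xs ≠ D) := by
  induction D generalizing xs with
  | nil =>
    rw [matchRuns]
    rcases h : runsRef xs with _ | ⟨a, t⟩
    · simp [(runsRef_eq_nil xs).mp h]
    · cases hne : xs.any (fun x => x == 1) with
      | false =>
        have h0 := (runsRef_eq_nil xs).mpr hne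
        rw [h] at h0; simp at h0
      | true => simp
  | cons d ds ih =>
    rw [matchRuns]
    have hruns : runsRef xs = runsRef (xs.dropWhile (fun x => x != 1)) :=
      (runsRef_dropWhile_ne xs).symm
    have hhead := head?_dropWhile_false (fun x => x != 1) xs
    generalize hg : xs.dropWhile (fun x => x != 1) = ys at hruns hhead ⊢
    cases ys with
    | nil =>
      -- no 1 left in the row: runsRef xs = [], and the matcher's first check fires
      have h0 : runsRef xs = [] := by rw [hruns]; simp [runsRef]
      have hc : (decide (d < 1) || decide ((([] : List Int).length : Int) < d)) = true := by
        simp only [List.length_nil, Int.natCast_zero]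
        rcases lt_or_ge d 1 with h | h
        · simp [h]
        · simp; omega
      rw [if_pos hc]
      simp [h0]
    | cons y ys' =>
      have hy : y = 1 := by simpa using hhead y rfl
      subst hy
      obtain ⟨ones, rest, hsplit, hall, hrhead, hpos, hrun⟩ := block_decomp ys'
      rw [← hsplit] at hruns hrun ⊢
      have hrunxs : runsRef xs = (ones.length : Int) :: runsRef rest := hruns.trans hrun
      have hget_lt : ∀ k, k < ones.length → (ones ++ rest)[k]? = some 1 := by
        intro k hk
        rw [List.getElem?_append_left hk]
        rcases hgk : ones[k]? with _ | ⟨a⟩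
        · rw [List.getElem?_eq_none_iff] at hgk; omega
        · exact congrArg some (hall a (List.mem_of_getElem? hgk))
      have hget_r : (ones ++ rest)[ones.length]? = rest.head? := by
        rw [List.getElem?_append_right le_rfl, Nat.sub_self]
        cases rest <;> simp
      have hlen : (ones ++ rest).length = ones.length + rest.length := by simp
      by_cases hd1 : d < 1
      · rw [if_pos (by simp [hd1])]
        have hne : ((ones.length : Nat) : Int) ≠ d := by omega
        simp [hrunxs, hne]
      · rw [not_lt] at hd1
        have hdnat : ((d.toNat : Nat) : Int) = d := Int.toNat_of_nonneg (by omega)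
        by_cases hd2 : (((ones ++ rest).length : Nat) : Int) < d
        · rw [if_pos (by simp only [hd2, decide_true, Bool.or_true])]
          have hne : ((ones.length : Nat) : Int) ≠ d := by
            have : ones.length ≤ (ones ++ rest).length := by rw [hlen]; omega
            omega
          simp [hrunxs, hne]
        · rw [if_neg (by simp only [Bool.or_eq_true, decide_eq_true_eq]; omega)]
          rw [not_lt] at hd2
          have hnlen : d.toNat ≤ (ones ++ rest).length := by omega
          rcases lt_trichotomy d.toNat ones.length with hlt | heq | hgt
          · -- d < length of the block: the first d elements are 1s, and so is the one at index d
            have htk : (((ones ++ rest).take d.toNat).any (fun x => x != 1)) = false := by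
              rw [List.take_append_of_le_length (by omega)]
              simp only [List.any_eq_false]
              intro a ha
              simp [hall a (List.mem_of_mem_take ha)]
            rw [if_neg (by simp [htk])]
            have hgn : (ones ++ rest)[d.toNat]? = some 1 := hget_lt d.toNat hlt
            rw [if_pos (by rw [hgn]; simp; omega)]
            have hne : ((ones.length : Nat) : Int) ≠ d := by omega
            simp [hrunxs, hne]
          · -- d = length of the block: everything matches it; recurse on the rest of the row
            have htk : (((ones ++ rest).take d.toNat).any (fun x => x != 1)) = false := by
              rw [List.take_append_of_le_length (by omega)]
              simp only [List.any_eq_false]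
              intro a ha
              simp [hall a (List.mem_of_mem_take ha)]
            rw [if_neg (by simp [htk])]
            have hthird : (decide (d < (((ones ++ rest).length : Nat) : Int)) &&
                ((ones ++ rest)[d.toNat]?.getD 0 == 1)) = false := by
              rcases hh : rest.head? with _ | ⟨b⟩
              · have hrnil : rest = [] := by cases rest <;> simp_all
                have h1 : (ones ++ rest).length = ones.length := by rw [hrnil]; simp
                have hL0 : ¬ d < (((ones ++ rest).length : Nat) : Int) := by
                  rw [h1]; omega
                rw [decide_eq_false hL0, Bool.false_and]
              · have hb := hrhead b (by rw [hh]; rfl)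
                rw [heq, hget_r, hh]
                simp only [Option.getD_some, hb, Bool.and_false]
            rw [if_neg (by rw [hthird]; simp)]
            rw [heq, List.drop_left, ih, hrunxs]
            have hdr : ((ones.length : Nat) : Int) = d := by omega
            by_cases hrest2 : runsRef rest = ds <;> simp [hrest2, hdr]
          · -- d > length of the block: the element right after the block is not 1
            have hrestne : rest ≠ [] := by
              intro h0
              have h1 : (ones ++ rest).length = ones.length := by rw [h0]; simp
              omega
            obtain ⟨b, rest', hb⟩ : ∃ b rest', rest = b :: rest' := by
              cases rest with
              | nil => exact absurd rfl hrestne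
              | cons b rest' => exact ⟨b, rest', rfl⟩
            have hbne : (b == 1) = false := hrhead b (by rw [hb]; rfl)
            have hmem : b ∈ (ones ++ rest).take d.toNat := by
              apply List.mem_of_getElem? (i := ones.length)
              rw [List.getElem?_take_of_lt hgt, hget_r, hb]
              rfl
            rw [if_pos (by
              simp only [List.any_eq_true]
              exact ⟨b, hmem, by simp_all⟩)]
            have hne : ((ones.length : Nat) : Int) ≠ d := by omega
            simp [hrunxs, hne]

-- bridge: the index-carrying loop of the port equals the suffix-list reference
theorem skipIdx_eq (w : List Int) (pos : Nat) :
    skipIdx w pos = pos + ((w.drop pos).takeWhile (fun x => x != 1)).length := by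
  fun_induction skipIdx with
  | case1 pos h hv ih =>
    have hd : w.drop pos = w[pos] :: w.drop (pos + 1) := List.drop_eq_getElem_cons h
    have hb : (w[pos] != 1) = true := by simpa using hv
    rw [ih, hd, List.takeWhile_cons, hb, if_pos rfl, List.length_cons]
    omega
  | case2 pos h hv =>
    have hd : w.drop pos = w[pos] :: w.drop (pos + 1) := List.drop_eq_getElem_cons h
    have hb : (w[pos] != 1) = false := by simpa using hv
    rw [hd, List.takeWhile_cons, hb]
    simp
  | case3 pos h =>
    have hd : w.drop pos = [] := List.drop_eq_nil_of_le (by omega)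
    simp [hd]

theorem anyOnesFrom_eq (w : List Int) (pos : Nat) :
    anyOnesFrom w pos = (w.drop pos).any (fun x => x == 1) := by
  fun_induction anyOnesFrom with
  | case1 pos h hv =>
    have hd : w.drop pos = w[pos] :: w.drop (pos + 1) := List.drop_eq_getElem_cons h
    have hb : (w[pos] == 1) = true := by simpa using hv
    rw [hd, List.any_cons, hb, Bool.true_or]
  | case2 pos h hv ih =>
    have hd : w.drop pos = w[pos] :: w.drop (pos + 1) := List.drop_eq_getElem_cons h
    have hb : (w[pos] == 1) = false := by simpa using hv
    rw [ih, hd, List.any_cons, hb, Bool.false_or]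
  | case3 pos h =>
    have hd : w.drop pos = [] := List.drop_eq_nil_of_le (by omega)
    simp [hd]

theorem anyNonOne_eq (w : List Int) (k : Nat) :
    ∀ pos, pos + k ≤ w.length →
      anyNonOne w pos k = ((w.drop pos).take k).any (fun x => x != 1) := by
  induction k with
  | zero => intro pos _; simp [anyNonOne]
  | succ k ihk =>
    intro pos hk
    have h : pos < w.length := by omega
    have hd : w.drop pos = w[pos] :: w.drop (pos + 1) := List.drop_eq_getElem_cons h
    have hget : w.getD pos 0 = w[pos] := by
      rw [List.getD_eq_getElem?_getD, List.getElem?_eq_getElem h]; rfl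
    rw [anyNonOne, hd, List.take_succ_cons, List.any_cons, hget, ihk (pos + 1) (by omega)]
    by_cases hv : w[pos] = 1
    · simp [hv]
    · simp [hv]

theorem posMatch_eq (w : List Int) (D : List Int) :
    ∀ pos, pos ≤ w.length → posMatch w pos D = matchRuns (w.drop pos) D := by
  induction D with
  | nil => intro pos _; rw [posMatch, matchRuns, anyOnesFrom_eq]
  | cons d ds ih =>
    intro pos hpos
    rw [posMatch, matchRuns]
    have hsk := skipIdx_eq w pos
    have htle : ((w.drop pos).takeWhile (fun x => x != 1)).length ≤ w.length - pos := by
      calc ((w.drop pos).takeWhile (fun x => x != 1)).length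
          ≤ (w.drop pos).length := (List.takeWhile_sublist _).length_le
        _ = w.length - pos := List.length_drop
    have hple : skipIdx w pos ≤ w.length := by omega
    have hysdef : (w.drop pos).dropWhile (fun x => x != 1) = w.drop (skipIdx w pos) := by
      rw [dropWhile_eq_drop, List.drop_drop]
      congr 1
      omega
    have hlen : (((w.drop (skipIdx w pos)).length : Nat) : Int) =
        (w.length : Int) - ((skipIdx w pos : Nat) : Int) := by
      rw [List.length_drop, Nat.cast_sub hple]
    simp only [hysdef, hlen]
    by_cases hc1 : d < 1 ∨ (w.length : Int) - ((skipIdx w pos : Nat) : Int) < d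
    · have e1 : (decide (d < 1) ||
          decide ((w.length : Int) - ((skipIdx w pos : Nat) : Int) < d)) = true := by
        simpa using hc1
      simp only [e1, if_true]
    · have e1 : (decide (d < 1) ||
          decide ((w.length : Int) - ((skipIdx w pos : Nat) : Int) < d)) = false := by
        simpa using hc1
      simp only [e1, Bool.false_eq_true, if_false]
      rw [not_or, not_lt, not_lt] at hc1
      have hdle : skipIdx w pos + d.toNat ≤ w.length := by omega
      have e2 : anyNonOne w (skipIdx w pos) d.toNat =
          (((w.drop (skipIdx w pos)).take d.toNat).any (fun x => x != 1)) :=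
        anyNonOne_eq w d.toNat (skipIdx w pos) hdle
      rw [e2]
      by_cases hc2 : (((w.drop (skipIdx w pos)).take d.toNat).any (fun x => x != 1)) = true
      · simp only [hc2, if_true]
      · simp only [Bool.not_eq_true] at hc2
        simp only [hc2, Bool.false_eq_true, if_false]
        have e3 : (decide (skipIdx w pos + d.toNat < w.length) &&
            (w.getD (skipIdx w pos + d.toNat) 0 == 1)) =
            (decide (d < (w.length : Int) - ((skipIdx w pos : Nat) : Int)) &&
            ((w.drop (skipIdx w pos))[d.toNat]?.getD 0 == 1)) := by
          by_cases hin : skipIdx w pos + d.toNat < w.length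
          · have hidx : (w.drop (skipIdx w pos))[d.toNat]? = w[skipIdx w pos + d.toNat]? := by
              rw [List.getElem?_drop]
            have hget : w.getD (skipIdx w pos + d.toNat) 0 = w[skipIdx w pos + d.toNat] := by
              rw [List.getD_eq_getElem?_getD, List.getElem?_eq_getElem hin]; rfl
            rw [hidx, List.getElem?_eq_getElem hin, hget]
            have hd1 : decide (skipIdx w pos + d.toNat < w.length) = true := by simp [hin]
            have hd2 : decide (d < (w.length : Int) - ((skipIdx w pos : Nat) : Int)) = true := by
              simp only [decide_eq_true_eq]; omega
            rw [hd1, hd2]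
            rfl
          · have hd1 : decide (skipIdx w pos + d.toNat < w.length) = false := by simp [hin]
            have hd2 : decide (d < (w.length : Int) - ((skipIdx w pos : Nat) : Int)) = false := by
              simp only [decide_eq_false_iff_not]; omega
            rw [hd1, hd2, Bool.false_and, Bool.false_and]
        rw [e3]
        by_cases hc4 : (decide (d < (w.length : Int) - ((skipIdx w pos : Nat) : Int)) &&
            ((w.drop (skipIdx w pos))[d.toNat]?.getD 0 == 1)) = true
        · simp only [hc4, if_true]
        · simp only [Bool.not_eq_true] at hc4
          simp only [hc4, Bool.false_eq_true, if_false]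
          rw [ih (skipIdx w pos + d.toNat) hdle, List.drop_drop]

-- ===== VERDICT (by name: the statement is the Claim_ definition above) =====
theorem zly_wiersz_spec : Claim_equal_zly_wiersz := by
  intro wiersz D _
  unfold Spec_zly_wiersz zly_wiersz zly_wiersz_alt
  rw [posMatch_eq wiersz D 0 (Nat.zero_le _), List.drop_zero, matchRuns_eq, zlyOuter_eq]
  simp only [List.nil_append, List.drop_zero]
  by_cases h : runsRef wiersz = D <;> simp [h]
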